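-- pv_equiv track=rewrite | github.com/oBerserk007o/GridMaker | meshMaker.py | distanceCorners
-- ===== SOURCE A (Python) =====
-- from math import sqrt
--
-- def distanceCorners(meshList: [(int, int)], width: int, height: int):
--     distances = [distance(pos) for pos in meshList]
--     topLeftEdge = meshList[distances.index(min(distances))]
--     distances = [distance(pos, (width, 0)) for pos in meshList]
--     topRightEdge = meshList[distances.index(min(distances))]
--     distances = [distance(pos, (0, height)) for pos in meshList]
--     bottomLeftEdge = meshList[distances.index(min(distances))]
--     distances = [distance(pos, (width, height)) for pos in meshList]
--     bottomRightEdge = meshList[distances.index(min(distances))]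
--
--     return [topLeftEdge, topRightEdge, bottomLeftEdge, bottomRightEdge]
--
-- def distance(pos: (int, int), origin=(0, 0)):
--     return sqrt((pos[0] - origin[0]) ** 2 + (pos[1] - origin[1]) ** 2)
-- ===== SOURCE B (Python) =====
-- def distanceCorners(meshList: [(int, int)], width: int, height: int):
--     # one pass over meshList holding four running (best point, best squared distance)
--     # trackers; strict '<' updates keep the first point on ties, like index(min(...)).
--     tl = tr = bl = br = meshList[0]
--     tld = _sq(tl, 0, 0)
--     trd = _sq(tr, width, 0)
--     bld = _sq(bl, 0, height)
--     brd = _sq(br, width, height)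
--     for p in meshList[1:]:
--         d = _sq(p, 0, 0)
--         if d < tld:
--             tl, tld = p, d
--         d = _sq(p, width, 0)
--         if d < trd:
--             tr, trd = p, d
--         d = _sq(p, 0, height)
--         if d < bld:
--             bl, bld = p, d
--         d = _sq(p, width, height)
--         if d < brd:
--             br, brd = p, d
--     return [tl, tr, bl, br]
--
-- def _sq(p, ox, oy):
--     return (p[0] - ox) ** 2 + (p[1] - oy) ** 2
-- ===== Notes on version B (the rewrite author's own statement) =====
-- stated objective: alternative
-- what changed: B replaces A's four list comprehensions plus four min()/index() rescans (and the float sqrt per point) with one integer-only pass over meshList that keeps four running (best point, best squared distance) trackers updated by strict '<'.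
import Mathlib
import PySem

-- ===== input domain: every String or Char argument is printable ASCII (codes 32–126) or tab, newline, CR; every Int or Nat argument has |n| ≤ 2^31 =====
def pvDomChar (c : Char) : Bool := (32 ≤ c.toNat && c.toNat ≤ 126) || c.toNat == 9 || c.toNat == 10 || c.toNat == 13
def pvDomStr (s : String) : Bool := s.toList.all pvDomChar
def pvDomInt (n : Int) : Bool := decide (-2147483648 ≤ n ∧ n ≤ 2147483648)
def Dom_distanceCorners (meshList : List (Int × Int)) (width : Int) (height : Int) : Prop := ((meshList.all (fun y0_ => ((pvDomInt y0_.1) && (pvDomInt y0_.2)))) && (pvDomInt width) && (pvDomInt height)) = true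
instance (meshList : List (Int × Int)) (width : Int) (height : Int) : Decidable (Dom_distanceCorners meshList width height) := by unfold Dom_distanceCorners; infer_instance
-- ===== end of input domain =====

-- B does one integer-only pass with four running minima instead of A's four comprehension+min+index scans over float sqrt distances.


-- ===== PORT A =====
-- Python's `distance` returns sqrt of this integer; within Pre_'s coordinate bound the
-- IEEE sqrt of these exact integers is strictly increasing and injective in the radicand,
-- so A's min/index comparisons over sqrt values coincide exactly with comparisons of
-- these integers; the port therefore compares the radicands (exact on Pre_).
def pySqDist (pos : Int × Int) (origin : Int × Int) : Int :=
  (pos.1 - origin.1) ^ 2 + (pos.2 - origin.2) ^ 2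

-- one `distances = [...]; edge = meshList[distances.index(min(distances))]` block of A
def aPick (meshList : List (Int × Int)) (origin : Int × Int) : Int × Int :=
  let distances := meshList.map (fun pos => pySqDist pos origin)
  match PySem.List.min? distances (fun v => v) with
  | none => (0, 0)            -- min([]) raises ValueError; excluded by Pre_
  | some m =>
    match PySem.List.index? distances m with
    | none => (0, 0)          -- unreachable: m is a member
    | some i => (PySem.List.pyGet? meshList (i : Int)).getD (0, 0)

def distanceCorners (meshList : List (Int × Int)) (width : Int) (height : Int) : List (Int × Int) :=
  let topLeftEdge := aPick meshList (0, 0)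
  let topRightEdge := aPick meshList (width, 0)
  let bottomLeftEdge := aPick meshList (0, height)
  let bottomRightEdge := aPick meshList (width, height)
  [topLeftEdge, topRightEdge, bottomLeftEdge, bottomRightEdge]

-- ===== PORT B =====
def bSq (p : Int × Int) (ox oy : Int) : Int :=
  (p.1 - ox) ^ 2 + (p.2 - oy) ^ 2

-- one `d = _sq(p, ox, oy); if d < best: update` block of B's loop body
def bStep (ox oy : Int) (s : (Int × Int) × Int) (p : Int × Int) : (Int × Int) × Int :=
  let d := bSq p ox oy
  if d < s.2 then (p, d) else s

def distanceCorners_alt (meshList : List (Int × Int)) (width : Int) (height : Int) : List (Int × Int) :=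
  match meshList with
  | [] => []                  -- meshList[0] raises IndexError; excluded by Pre_
  | p0 :: rest =>
    let r := rest.foldl
      (fun (s : ((Int × Int) × Int) × ((Int × Int) × Int) × ((Int × Int) × Int) × ((Int × Int) × Int)) p =>
        (bStep 0 0 s.1 p, bStep width 0 s.2.1 p, bStep 0 height s.2.2.1 p, bStep width height s.2.2.2 p))
      ((p0, bSq p0 0 0), (p0, bSq p0 width 0), (p0, bSq p0 0 height), (p0, bSq p0 width height))
    [r.1.1, r.2.1.1, r.2.2.1.1, r.2.2.2.1]

-- ===== PRECONDITION & SPEC =====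
-- Pre_ excludes the empty list, on which A raises ValueError (min of an empty sequence) and B
-- raises IndexError; and it excludes coordinates/extents beyond 2^23 in magnitude, where
-- Python's float sqrt can merge distinct exact distances so that A's choice of point becomes a
-- rounding accident of the float representation that exact integer arithmetic cannot match.
def Pre_distanceCorners (meshList : List (Int × Int)) (width : Int) (height : Int) : Prop :=
  meshList ≠ [] ∧ (∀ p ∈ meshList, |p.1| ≤ 8388608 ∧ |p.2| ≤ 8388608) ∧
    |width| ≤ 8388608 ∧ |height| ≤ 8388608
instance (meshList : List (Int × Int)) (width : Int) (height : Int) : Decidable (Pre_distanceCorners meshList width height) := by unfold Pre_distanceCorners; infer_instance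

def pvWitness_distanceCorners : (List (Int × Int)) × Int × Int := ([(1, 2), (3, 0), (0, 3), (2, 2)], 3, 3)

def Spec_distanceCorners (meshList : List (Int × Int)) (width : Int) (height : Int) (out : List (Int × Int)) : Prop := out = distanceCorners_alt meshList width height
instance (meshList : List (Int × Int)) (width : Int) (height : Int) (out : List (Int × Int)) : Decidable (Spec_distanceCorners meshList width height out) := by unfold Spec_distanceCorners; infer_instance

-- ===== CLAIM (what is proved, stated in full; the proofs are below) =====
def Claim_equal_distanceCorners : Prop := ∀ (meshList : List (Int × Int)) (width : Int) (height : Int), Dom_distanceCorners meshList width height → Pre_distanceCorners meshList width height → Spec_distanceCorners meshList width height (distanceCorners meshList width height)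

-- ===== LEMMAS AND PROOFS =====

lemma sq_eq (p : Int × Int) (ox oy : Int) : pySqDist p (ox, oy) = bSq p ox oy := rfl

-- absorbing the second element into the head: A's pick over x :: y :: ys equals the pick
-- over (strict-min-first of x,y) :: ys
def pickF (f : Int × Int → Int) (l : List (Int × Int)) : Int × Int :=
  match PySem.List.min? (l.map f) (fun v => v) with
  | none => (0, 0)
  | some m =>
    match PySem.List.index? (l.map f) m with
    | none => (0, 0)
    | some i => (PySem.List.pyGet? l (i : Int)).getD (0, 0)

lemma aPick_eq_pickF (l : List (Int × Int)) (o : Int × Int) :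
    aPick l o = pickF (fun p => pySqDist p o) l := rfl

lemma pickF_cons_cons (f : Int × Int → Int) (x y : Int × Int) (ys : List (Int × Int)) :
    pickF f (x :: y :: ys) = pickF f ((if f y < f x then y else x) :: ys) := by
  set z := if f y < f x then y else x with hz
  set ds := ys.map f with hds
  have hm : PySem.List.min? (f z :: ds) (fun v => v) = some (ds.foldl min (f z)) :=
    PySem.List.min?_id_cons ..
  set m := ds.foldl min (f z) with hmdef
  have hmlhs : PySem.List.min? (f x :: f y :: ds) (fun v => v) = some m := by
    rw [PySem.List.min?_id_cons]
    congr 1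
    simp only [List.foldl_cons]
    congr 1
    rw [hz]
    split_ifs with h <;> omega
  have hmem : m ∈ f z :: ds := PySem.List.min?_mem hm
  have hmz : m ≤ f z := PySem.List.min?_isMin hm _ (by simp)
  have hmx : m ≤ f x := by rw [hz] at hmz; split_ifs at hmz with h <;> omega
  have hmy : m ≤ f y := by rw [hz] at hmz; split_ifs at hmz with h <;> omega
  simp only [pickF, List.map_cons, ← hds, hmlhs, hm]
  by_cases hxy : f y < f x
  · have hzy : z = y := by rw [hz, if_pos hxy]
    have hmemy : m ∈ f y :: ds := by rw [← hzy]; exact hmem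
    obtain ⟨i, hi⟩ := Option.isSome_iff_exists.mp ((PySem.List.index?_isSome_iff _ _).mpr hmemy)
    rw [PySem.List.index?_cons_of_ne _ (by omega : f x ≠ m), hzy, hi]
    simp only [Option.map_some]
    rw [PySem.List.pyGet?_natCast, PySem.List.pyGet?_natCast]
    simp [List.getElem?_cons_succ]
  · have hzx : z = x := by rw [hz, if_neg hxy]
    by_cases hme : m = f x
    · rw [hzx, ← hme, PySem.List.index?_cons_self, PySem.List.index?_cons_self]
      simp
    · have hmemx : m ∈ f x :: ds := by rw [← hzx]; exact hmem
      have hmds : m ∈ ds := by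
        rcases List.mem_cons.mp hmemx with h | h
        · exact absurd h hme
        · exact h
      obtain ⟨i, hi⟩ := Option.isSome_iff_exists.mp ((PySem.List.index?_isSome_iff _ _).mpr hmds)
      rw [PySem.List.index?_cons_of_ne _ (by omega : f x ≠ m),
          PySem.List.index?_cons_of_ne _ (by omega : f y ≠ m), hzx,
          PySem.List.index?_cons_of_ne _ (by omega : f x ≠ m), hi]
      simp only [Option.map_some]
      rw [PySem.List.pyGet?_natCast, PySem.List.pyGet?_natCast]
      simp [List.getElem?_cons_succ]

lemma aPick_singleton (o x : Int × Int) : aPick [x] o = x := by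
  simp [aPick, PySem.List.min?_id_cons, PySem.List.index?_eq_idxOf?]

lemma aPick_cons_cons (o x y : Int × Int) (ys : List (Int × Int)) :
    aPick (x :: y :: ys) o = aPick ((if pySqDist y o < pySqDist x o then y else x) :: ys) o := by
  rw [aPick_eq_pickF, aPick_eq_pickF]
  exact pickF_cons_cons (fun p => pySqDist p o) x y ys

lemma foldl_bStep_pick (ox oy : Int) (xs : List (Int × Int)) (x : Int × Int) :
    aPick (x :: xs) (ox, oy) = (xs.foldl (bStep ox oy) (x, bSq x ox oy)).1 := by
  induction xs generalizing x with
  | nil => simpa using aPick_singleton (ox, oy) x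
  | cons y ys ih =>
    rw [aPick_cons_cons, List.foldl_cons]
    have hstep : bStep ox oy (x, bSq x ox oy) y
        = ((if pySqDist y (ox, oy) < pySqDist x (ox, oy) then y else x),
           bSq (if pySqDist y (ox, oy) < pySqDist x (ox, oy) then y else x) ox oy) := by
      simp only [bStep, sq_eq]
      split_ifs <;> rfl
    rw [hstep]
    exact ih _

-- ===== VERDICT (by name: the statement is the Claim_ definition above) =====
theorem distanceCorners_spec : Claim_equal_distanceCorners := by
  intro meshList width height _ hpre
  unfold Spec_distanceCorners
  match meshList, hpre with
  | p0 :: rest, _ =>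
    show distanceCorners (p0 :: rest) width height = distanceCorners_alt (p0 :: rest) width height
    simp only [distanceCorners, distanceCorners_alt]
    rw [PySem.List.foldl_prod_mk (f := bStep 0 0)
        (g := fun (s : ((Int × Int) × Int) × ((Int × Int) × Int) × ((Int × Int) × Int)) p =>
          (bStep width 0 s.1 p, bStep 0 height s.2.1 p, bStep width height s.2.2 p)),
      PySem.List.foldl_prod_mk (f := bStep width 0)
        (g := fun (s : ((Int × Int) × Int) × ((Int × Int) × Int)) p =>
          (bStep 0 height s.1 p, bStep width height s.2 p)),
      PySem.List.foldl_prod_mk (f := bStep 0 height) (g := bStep width height)]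
    simp only [foldl_bStep_pick]
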